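-- pv_equiv track=rewrite | github.com/lsst-sqre/sasquatch | src/sasquatch/migration.py | _find_import_context_indexes
-- ===== SOURCE A (Python) =====
-- def _find_import_context_indexes(
--     lines: list[str],
-- ) -> tuple[int | None, int | None, int | None, int | None]:
--     """Locate DML/context headers and the first data line."""
--     dml_index: int | None = None
--     database_index: int | None = None
--     retention_index: int | None = None
--     first_data_index: int | None = None
--
--     for index, line in enumerate(lines):
--         stripped = line.strip()
--         if stripped.startswith("#"):
--             if stripped == "# DML":
--                 dml_index = index
--             elif stripped.startswith("# CONTEXT-DATABASE:"):
--                 database_index = index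
--             elif stripped.startswith("# CONTEXT-RETENTION-POLICY:"):
--                 retention_index = index
--             continue
--         if stripped:
--             first_data_index = index
--             break
--
--     return dml_index, database_index, retention_index, first_data_index
-- ===== SOURCE B (Python) =====
-- def _find_import_context_indexes(
--     lines: list[str],
-- ) -> tuple[int | None, int | None, int | None, int | None]:
--     """Boundary pass first, then a backward first-match pass over the header prefix."""
--     first_data_index = None
--     for index, line in enumerate(lines):
--         stripped = line.strip()
--         if stripped and not stripped.startswith("#"):
--             first_data_index = index
--             break
--
--     prefix = lines if first_data_index is None else lines[:first_data_index]
--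
--     dml_index = None
--     database_index = None
--     retention_index = None
--     for index, line in reversed(list(enumerate(prefix))):
--         stripped = line.strip()
--         if dml_index is None and stripped == "# DML":
--             dml_index = index
--         if database_index is None and stripped.startswith("# CONTEXT-DATABASE:"):
--             database_index = index
--         if retention_index is None and stripped.startswith("# CONTEXT-RETENTION-POLICY:"):
--             retention_index = index
--
--     return dml_index, database_index, retention_index, first_data_index
-- ===== Notes on version B (the rewrite author's own statement) =====
-- stated objective: alternative
-- what changed: Replaces A's single break-terminated loop that overwrites three header slots with a two-pass decomposition: one boundary pass finding the first data line, then a backward first-match scan over only the header prefix.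
import Mathlib
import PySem

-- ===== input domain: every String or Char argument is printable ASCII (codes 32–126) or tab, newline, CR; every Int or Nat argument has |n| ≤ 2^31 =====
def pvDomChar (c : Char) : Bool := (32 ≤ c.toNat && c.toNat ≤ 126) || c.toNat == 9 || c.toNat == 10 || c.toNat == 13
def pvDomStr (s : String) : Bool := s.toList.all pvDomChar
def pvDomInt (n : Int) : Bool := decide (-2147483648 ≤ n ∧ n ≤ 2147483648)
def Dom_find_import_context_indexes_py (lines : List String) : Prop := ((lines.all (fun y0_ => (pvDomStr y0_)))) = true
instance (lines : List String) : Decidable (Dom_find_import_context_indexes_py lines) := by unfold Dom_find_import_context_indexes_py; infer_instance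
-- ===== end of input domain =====

-- B replaces A's break-terminated single loop by a boundary pass plus a backward
-- first-match pass over the header prefix; same O(n), different decomposition.

-- ===== PORT A =====
-- A's enumerate loop with break, carried as structural recursion over the lines
-- with the running index and the three header accumulators.
def pvALoop (lines : List String) (i : Int) (d db r : Option Int) :
    Option Int × Option Int × Option Int × Option Int :=
  match lines with
  | [] => (d, db, r, none)
  | line :: rest =>
    let s := PySem.Str.strip line
    if PySem.Str.startswith s "#" then
      if s == "# DML" then pvALoop rest (i + 1) (some i) db r
      else if PySem.Str.startswith s "# CONTEXT-DATABASE:" then pvALoop rest (i + 1) d (some i) r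
      else if PySem.Str.startswith s "# CONTEXT-RETENTION-POLICY:" then pvALoop rest (i + 1) d db (some i)
      else pvALoop rest (i + 1) d db r
    else if s ≠ "" then (d, db, r, some i)
    else pvALoop rest (i + 1) d db r

def find_import_context_indexes_py (lines : List String) :
    Option Int × Option Int × Option Int × Option Int :=
  pvALoop lines 0 none none none

-- ===== PORT B =====
-- first loop of Source B: index of the first line whose strip is nonempty and not '#'-prefixed
def pvBFirst (lines : List String) (i : Int) : Option Int :=
  match lines with
  | [] => none
  | line :: rest =>
    let s := PySem.Str.strip line
    if s ≠ "" && !PySem.Str.startswith s "#" then some i else pvBFirst rest (i + 1)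

-- one iteration of Source B's second (backward, fill-if-None) loop
def pvBStep (acc : Option Int × Option Int × Option Int) (p : Int × String) :
    Option Int × Option Int × Option Int :=
  let s := PySem.Str.strip p.2
  (if acc.1.isNone && (s == "# DML") then some p.1 else acc.1,
   if acc.2.1.isNone && PySem.Str.startswith s "# CONTEXT-DATABASE:" then some p.1 else acc.2.1,
   if acc.2.2.isNone && PySem.Str.startswith s "# CONTEXT-RETENTION-POLICY:" then some p.1 else acc.2.2)

def find_import_context_indexes_py_alt (lines : List String) :
    Option Int × Option Int × Option Int × Option Int :=
  let fdo := pvBFirst lines 0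
  -- lines[:k] with k = pvBFirst ≥ 0 by construction, so List.take is exact here
  let prefix_ := match fdo with
    | none => lines
    | some k => lines.take k.toNat
  let acc := ((PySem.List.enumerate prefix_ 0).reverse).foldl pvBStep (none, none, none)
  (acc.1, acc.2.1, acc.2.2, fdo)

-- ===== PRECONDITION & SPEC =====
def Spec_find_import_context_indexes_py (lines : List String) (out : Option Int × Option Int × Option Int × Option Int) : Prop := out = find_import_context_indexes_py_alt lines
instance (lines : List String) (out : Option Int × Option Int × Option Int × Option Int) : Decidable (Spec_find_import_context_indexes_py lines out) := by unfold Spec_find_import_context_indexes_py; infer_instance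

-- ===== CLAIM (what is proved, stated in full; the proofs are below) =====
def Claim_equal_find_import_context_indexes_py : Prop := ∀ (lines : List String), Dom_find_import_context_indexes_py lines → Spec_find_import_context_indexes_py lines (find_import_context_indexes_py lines)

-- ===== LEMMAS AND PROOFS =====

-- proof-side helpers
def pvOE (x y : Option Int) : Option Int :=
  match x with
  | some j => some j
  | none => y

-- last index (with offset i) of a line satisfying p, A's overwrite semantics
def pvLM (p : String → Bool) (i : Int) : List String → Option Int
  | [] => none
  | l :: rest =>
    match pvLM p (i + 1) rest with
    | some j => some j
    | none => if p l then some i else none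

def pvPD (l : String) : Bool := PySem.Str.strip l == "# DML"
def pvPDb (l : String) : Bool := PySem.Str.startswith (PySem.Str.strip l) "# CONTEXT-DATABASE:"
def pvPR (l : String) : Bool := PySem.Str.startswith (PySem.Str.strip l) "# CONTEXT-RETENTION-POLICY:"
def pvHdrish (l : String) : Bool := !(PySem.Str.strip l ≠ "" && !PySem.Str.startswith (PySem.Str.strip l) "#")
def pvHdr (lines : List String) : List String := lines.takeWhile pvHdrish

lemma pvOE_cons (p : String → Bool) (i : Int) (l : String) (T : List String) (d : Option Int) :
    pvOE (pvLM p i (l :: T)) d = pvOE (pvLM p (i + 1) T) (if p l then some i else d) := by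
  simp only [pvLM]
  cases pvLM p (i + 1) T <;> cases h : p l <;> simp [pvOE]

lemma pvPDb_not_pvPR (l : String) (h : pvPDb l = true) : pvPR l = false := by
  by_contra hc
  have hr : pvPR l = true := by revert hc; cases pvPR l <;> simp
  rw [pvPDb, PySem.Str.startswith_eq, PySem.Chars.startswith_iff] at h
  rw [pvPR, PySem.Str.startswith_eq, PySem.Chars.startswith_iff] at hr
  rcases List.prefix_or_prefix_of_prefix h hr with hp | hp <;> revert hp <;> decide

-- A's loop computed as: last match of each predicate within the header prefix
-- (falling back to the accumulator), plus the first-data index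
set_option maxHeartbeats 1000000 in
lemma pvALoop_eq (lines : List String) : ∀ (i : Int) (d db r : Option Int),
    pvALoop lines i d db r =
      (pvOE (pvLM pvPD i (pvHdr lines)) d,
       pvOE (pvLM pvPDb i (pvHdr lines)) db,
       pvOE (pvLM pvPR i (pvHdr lines)) r,
       pvBFirst lines i) := by
  induction lines with
  | nil => intro i d db r; simp [pvALoop, pvHdr, pvLM, pvOE, pvBFirst]
  | cons l T ih =>
    intro i d db r
    cases hs : PySem.Str.startswith (PySem.Str.strip l) "#" with
    | true =>
      have hhdr : pvHdrish l = true := by unfold pvHdrish; rw [hs]; simp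
      have hpfx : pvHdr (l :: T) = l :: pvHdr T := by simp [pvHdr, hhdr]
      have hbf : pvBFirst (l :: T) i = pvBFirst T (i + 1) := by
        simp only [pvBFirst]; rw [hs]; simp
      cases h1 : (PySem.Str.strip l == "# DML") with
      | true =>
        have hstr : PySem.Str.strip l = "# DML" := by simpa using h1
        have hpdb : pvPDb l = false := by unfold pvPDb; rw [hstr]; decide
        have hpr : pvPR l = false := by unfold pvPR; rw [hstr]; decide
        have hpd1 : pvPD l = true := h1
        simp only [pvALoop, hs, h1, if_true]
        rw [hpfx, hbf, pvOE_cons pvPD i l (pvHdr T) d, pvOE_cons pvPDb i l (pvHdr T) db,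
          pvOE_cons pvPR i l (pvHdr T) r, hpd1, hpdb, hpr]
        simpa using ih (i + 1) (some i) db r
      | false =>
        cases h2 : PySem.Str.startswith (PySem.Str.strip l) "# CONTEXT-DATABASE:" with
        | true =>
          have hpr : pvPR l = false := pvPDb_not_pvPR l h2
          have hpd1 : pvPD l = false := h1
          have hpdb1 : pvPDb l = true := h2
          simp only [pvALoop, hs, h1, h2, if_true, Bool.false_eq_true, if_false]
          rw [hpfx, hbf, pvOE_cons pvPD i l (pvHdr T) d, pvOE_cons pvPDb i l (pvHdr T) db,
            pvOE_cons pvPR i l (pvHdr T) r, hpd1, hpdb1, hpr]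
          simpa using ih (i + 1) d (some i) r
        | false =>
          cases h3 : PySem.Str.startswith (PySem.Str.strip l) "# CONTEXT-RETENTION-POLICY:" with
          | true =>
            have hpd1 : pvPD l = false := h1
            have hpdb1 : pvPDb l = false := h2
            have hpr1 : pvPR l = true := h3
            simp only [pvALoop, hs, h1, h2, h3, if_true, Bool.false_eq_true, if_false]
            rw [hpfx, hbf, pvOE_cons pvPD i l (pvHdr T) d, pvOE_cons pvPDb i l (pvHdr T) db,
              pvOE_cons pvPR i l (pvHdr T) r, hpd1, hpdb1, hpr1]
            simpa using ih (i + 1) d db (some i)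
          | false =>
            have hpd1 : pvPD l = false := h1
            have hpdb1 : pvPDb l = false := h2
            have hpr1 : pvPR l = false := h3
            simp only [pvALoop, hs, h1, h2, h3, Bool.false_eq_true, if_false]
            rw [hpfx, hbf, pvOE_cons pvPD i l (pvHdr T) d, pvOE_cons pvPDb i l (pvHdr T) db,
              pvOE_cons pvPR i l (pvHdr T) r, hpd1, hpdb1, hpr1]
            simpa using ih (i + 1) d db r
    | false =>
      by_cases he : PySem.Str.strip l = ""
      · have hhdr : pvHdrish l = true := by unfold pvHdrish; rw [he]; simp
        have hpfx : pvHdr (l :: T) = l :: pvHdr T := by simp [pvHdr, hhdr]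
        have hpd : pvPD l = false := by unfold pvPD; rw [he]; decide
        have hpdb : pvPDb l = false := by unfold pvPDb; rw [he]; decide
        have hpr : pvPR l = false := by unfold pvPR; rw [he]; decide
        have hbf : pvBFirst (l :: T) i = pvBFirst T (i + 1) := by
          simp only [pvBFirst]; rw [if_neg (by rw [he]; simp)]
        simp only [pvALoop]
        rw [if_neg (by rw [hs]; simp), if_neg (by rw [he]; simp)]
        rw [hpfx, hbf, pvOE_cons pvPD i l (pvHdr T) d, pvOE_cons pvPDb i l (pvHdr T) db,
          pvOE_cons pvPR i l (pvHdr T) r, hpd, hpdb, hpr]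
        simpa using ih (i + 1) d db r
      · have hhdr : pvHdrish l = false := by
          unfold pvHdrish; rw [hs]; simp [he]
        have hpfx : pvHdr (l :: T) = [] := by simp [pvHdr, hhdr]
        have hbf : pvBFirst (l :: T) i = some i := by
          simp only [pvBFirst]; rw [if_pos (by rw [hs]; simp [he])]
        simp only [pvALoop]
        rw [if_neg (by rw [hs]; simp), if_pos (by simp [he]), hpfx, hbf]
        simp [pvLM, pvOE]

lemma pvBFirst_le (lines : List String) : ∀ (i k : Int), pvBFirst lines i = some k → i ≤ k := by
  induction lines with
  | nil => intro i k h; simp [pvBFirst] at h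
  | cons l T ih =>
    intro i k h
    simp only [pvBFirst] at h
    split at h
    · cases h; omega
    · have := ih (i + 1) k h; omega

lemma pvTake_eq_hdr (lines : List String) : ∀ (i : Int),
    (match pvBFirst lines i with
      | none => lines
      | some k => lines.take (k - i).toNat) = pvHdr lines := by
  induction lines with
  | nil => intro i; cases h : pvBFirst ([] : List String) i <;> simp [pvHdr]
  | cons l T ih =>
    intro i
    by_cases hd : (decide (PySem.Str.strip l ≠ "") && !PySem.Str.startswith (PySem.Str.strip l) "#") = true
    · have hbf : pvBFirst (l :: T) i = some i := by
        simp only [pvBFirst]; rw [if_pos hd]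
      have hhdr : pvHdrish l = false := by unfold pvHdrish; rw [hd]; rfl
      simp [hbf, pvHdr, hhdr]
    · have hbf : pvBFirst (l :: T) i = pvBFirst T (i + 1) := by
        simp only [pvBFirst]; rw [if_neg hd]
      have hdf : (decide (PySem.Str.strip l ≠ "") && !PySem.Str.startswith (PySem.Str.strip l) "#") = false := by
        revert hd; cases (decide (PySem.Str.strip l ≠ "") && !PySem.Str.startswith (PySem.Str.strip l) "#") <;> simp
      have hhdr : pvHdrish l = true := by unfold pvHdrish; rw [hdf]; rfl
      have hpfx : pvHdr (l :: T) = l :: pvHdr T := by simp [pvHdr, hhdr]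
      rw [hbf, hpfx]
      cases hk : pvBFirst T (i + 1) with
      | none =>
        have := ih (i + 1)
        rw [hk] at this
        simpa using this
      | some k =>
        have hle : i + 1 ≤ k := pvBFirst_le T (i + 1) k hk
        have h1 : (k - i).toNat = (k - (i + 1)).toNat + 1 := by omega
        have := ih (i + 1)
        rw [hk] at this
        simp [h1, List.take_succ_cons, this]

lemma pvFill_component (i : Int) (p : Prop) [Decidable p] (d x : Option Int) :
    (if pvOE d x = none ∧ p then some i else pvOE d x) =
      pvOE d (match x with
        | some j => some j
        | none => if p then some i else none) := by
  cases d <;> cases x <;> by_cases hp : p <;> simp [pvOE, hp]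

lemma pvOE_none (x : Option Int) : pvOE x none = x := by cases x <;> rfl

lemma pvOE_none_left (y : Option Int) : pvOE none y = y := rfl

-- B's backward fill-if-None fold computes the last match of each predicate
lemma pvFold_eq (pfx : List String) : ∀ (i : Int) (d db r : Option Int),
    ((PySem.List.enumerate pfx i).reverse).foldl pvBStep (d, db, r) =
      (pvOE d (pvLM pvPD i pfx), pvOE db (pvLM pvPDb i pfx), pvOE r (pvLM pvPR i pfx)) := by
  induction pfx with
  | nil =>
    intro i d db r
    simp [PySem.List.enumerate_nil, pvLM, pvOE_none]
  | cons l T ih =>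
    intro i d db r
    rw [PySem.List.enumerate_cons, List.reverse_cons, List.foldl_append, ih (i + 1) d db r]
    simp only [List.foldl, pvBStep]
    refine Prod.ext ?_ (Prod.ext ?_ ?_)
    · simpa [pvLM, pvPD] using
        pvFill_component i (PySem.Str.strip l = "# DML") d (pvLM pvPD (i + 1) T)
    · simpa [pvLM, pvPDb] using
        pvFill_component i (PySem.Str.startswith (PySem.Str.strip l) "# CONTEXT-DATABASE:" = true)
          db (pvLM pvPDb (i + 1) T)
    · simpa [pvLM, pvPR] using
        pvFill_component i (PySem.Str.startswith (PySem.Str.strip l) "# CONTEXT-RETENTION-POLICY:" = true)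
          r (pvLM pvPR (i + 1) T)

-- ===== VERDICT (by name: the statement is the Claim_ definition above) =====
theorem find_import_context_indexes_py_spec : Claim_equal_find_import_context_indexes_py := by
  intro lines _
  unfold Spec_find_import_context_indexes_py
  unfold find_import_context_indexes_py find_import_context_indexes_py_alt
  rw [pvALoop_eq lines 0 none none none]
  have hpfx : (match pvBFirst lines 0 with
      | none => lines
      | some k => lines.take k.toNat) = pvHdr lines := by
    have := pvTake_eq_hdr lines 0
    cases h : pvBFirst lines 0 with
    | none => rw [h] at this; simpa [h] using this
    | some k => rw [h] at this; simpa [h] using this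
  simp only [hpfx, pvFold_eq (pvHdr lines) 0 none none none]
  simp only [pvOE_none, pvOE_none_left]
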